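-- pv_equiv track=rewrite | github.com/ukaismail-del/Offerion | app/utils/tailored_resume.py | _build_skills_to_feature
-- ===== SOURCE A (Python) =====
-- def _build_skills_to_feature(skills, match, jd_comparison):
--     featured = []
--     seen = set()
--
--     # First: skills that are both in resume and matched
--     matched_set = set()
--     if match and match.get("matched"):
--         matched_set.update(m.lower() for m in match["matched"])
--     if jd_comparison and jd_comparison.get("matched"):
--         matched_set.update(m.lower() for m in jd_comparison["matched"])
--
--     for s in skills:
--         if s.lower() in matched_set and s.lower() not in seen:
--             featured.append(
--                 {
--                     "skill": s,
--                     "priority": "high",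
--                     "reason": "matches target requirements",
--                 }
--             )
--             seen.add(s.lower())
--
--     # Then: remaining detected skills
--     for s in skills:
--         if s.lower() not in seen:
--             featured.append(
--                 {"skill": s, "priority": "medium", "reason": "detected in resume"}
--             )
--             seen.add(s.lower())
--
--     # Then: missing but important keywords to consider adding
--     if match and match.get("missing"):
--         for kw in match["missing"][:3]:
--             if kw.lower() not in seen:
--                 featured.append(
--                     {
--                         "skill": kw,
--                         "priority": "add",
--                         "reason": "missing from resume \u2014 add if truthful",
--                     }
--                 )
--                 seen.add(kw.lower())
--
--     return featured[:10]
-- ===== SOURCE B (Python) =====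
-- def _build_skills_to_feature(skills, match, jd_comparison):
--     matched_set = set()
--     if match and match.get("matched"):
--         matched_set.update(m.lower() for m in match["matched"])
--     if jd_comparison and jd_comparison.get("matched"):
--         matched_set.update(m.lower() for m in jd_comparison["matched"])
--
--     # One pass over skills: classify each first-seen (case-insensitive) skill.
--     high, medium, seen = [], [], set()
--     for s in skills:
--         low = s.lower()
--         if low in seen:
--             continue
--         seen.add(low)
--         if low in matched_set:
--             high.append(
--                 {
--                     "skill": s,
--                     "priority": "high",
--                     "reason": "matches target requirements",
--                 }
--             )
--         else:
--             medium.append(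
--                 {"skill": s, "priority": "medium", "reason": "detected in resume"}
--             )
--
--     featured = high + medium
--
--     if match and match.get("missing"):
--         for kw in match["missing"][:3]:
--             if kw.lower() not in seen:
--                 seen.add(kw.lower())
--                 featured.append(
--                     {
--                         "skill": kw,
--                         "priority": "add",
--                         "reason": "missing from resume \u2014 add if truthful",
--                     }
--                 )
--
--     return featured[:10]
-- ===== Notes on version B (the rewrite author's own statement) =====
-- stated objective: alternative
-- what changed: Replaces A's two full scans over skills (one for matched/high, a second for the remaining/medium) by a single pass that dedups each skill once and routes it into a high or medium accumulator, concatenating the two groups afterwards; the missing-keyword phase is unchanged.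
import Mathlib
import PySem

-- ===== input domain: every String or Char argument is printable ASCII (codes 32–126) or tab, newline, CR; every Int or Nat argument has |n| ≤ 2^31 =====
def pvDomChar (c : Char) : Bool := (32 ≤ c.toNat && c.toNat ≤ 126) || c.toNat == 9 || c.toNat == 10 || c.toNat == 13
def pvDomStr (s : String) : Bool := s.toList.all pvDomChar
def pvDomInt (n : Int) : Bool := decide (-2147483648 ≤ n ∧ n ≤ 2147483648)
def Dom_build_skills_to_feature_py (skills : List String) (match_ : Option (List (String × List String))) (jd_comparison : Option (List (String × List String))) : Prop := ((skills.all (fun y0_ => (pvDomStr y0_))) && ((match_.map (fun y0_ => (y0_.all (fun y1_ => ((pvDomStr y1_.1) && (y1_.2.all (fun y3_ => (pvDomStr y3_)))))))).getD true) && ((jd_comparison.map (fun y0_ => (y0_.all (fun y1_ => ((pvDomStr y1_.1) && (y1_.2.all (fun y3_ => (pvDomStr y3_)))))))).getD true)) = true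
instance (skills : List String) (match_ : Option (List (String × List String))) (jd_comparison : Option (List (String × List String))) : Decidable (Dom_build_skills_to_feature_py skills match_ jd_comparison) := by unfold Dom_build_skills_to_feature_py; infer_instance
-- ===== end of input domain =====

-- B replaces A's two scans over `skills` by one dedup-and-classify pass into two
-- accumulators (high ++ medium); return value proved equal on all inputs (alternative, not faster).

-- ===== PORT A =====
-- shared literal pieces: Python dict lookup (first match) and the three entry dicts
def pvLookup (d : List (String × List String)) (key : String) : Option (List String) :=
  List.lookup key d
def pvHigh (s : String) : List (String × String) :=
  [("skill", s), ("priority", "high"), ("reason", "matches target requirements")]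
def pvMed (s : String) : List (String × String) :=
  [("skill", s), ("priority", "medium"), ("reason", "detected in resume")]
def pvAdd (s : String) : List (String × String) :=
  [("skill", s), ("priority", "add"), ("reason", "missing from resume — add if truthful")]

-- matched_set construction (identical in A and in B, per Source B)
def pvMatchedSet (match_ jd_comparison : Option (List (String × List String))) : PySem.Set String :=
  let ms : PySem.Set String := PySem.Set.empty
  let ms :=
    match match_ with
    | some d =>
      if d ≠ [] then
        match pvLookup d "matched" with
        | some v => if v ≠ [] then PySem.Set.update ms (v.map PySem.Str.lower) else ms
        | none => ms
      else ms
    | none => ms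
  match jd_comparison with
  | some d =>
    if d ≠ [] then
      match pvLookup d "matched" with
      | some v => if v ≠ [] then PySem.Set.update ms (v.map PySem.Str.lower) else ms
      | none => ms
    else ms
  | none => ms

-- the missing-keyword loop and its guard (this phase is identical in A and in B)
def pvMissingLoop : List String → List (List (String × String)) × PySem.Set String → List (List (String × String)) × PySem.Set String
  | [], acc => acc
  | kw :: rest, (featured, seen) =>
    if seen.contains (PySem.Str.lower kw) then pvMissingLoop rest (featured, seen)
    else pvMissingLoop rest (featured ++ [pvAdd kw], PySem.Set.add seen (PySem.Str.lower kw))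

def pvMissingPhase (match_ : Option (List (String × List String))) (acc : List (List (String × String)) × PySem.Set String) : List (List (String × String)) × PySem.Set String :=
  match match_ with
  | some d =>
    if d ≠ [] then
      match pvLookup d "missing" with
      | some v => if v ≠ [] then pvMissingLoop (PySem.List.slice v none (some 3)) acc else acc
      | none => acc
    else acc
  | none => acc

-- A's first loop: matched skills, priority "high"
def pvALoop1 (M : PySem.Set String) : List String → List (List (String × String)) → PySem.Set String → List (List (String × String)) × PySem.Set String
  | [], f, seen => (f, seen)
  | s :: rest, f, seen =>
    if M.contains (PySem.Str.lower s) && !(seen.contains (PySem.Str.lower s)) then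
      pvALoop1 M rest (f ++ [pvHigh s]) (PySem.Set.add seen (PySem.Str.lower s))
    else pvALoop1 M rest f seen

-- A's second loop: remaining skills, priority "medium"
def pvALoop2 : List String → List (List (String × String)) → PySem.Set String → List (List (String × String)) × PySem.Set String
  | [], f, seen => (f, seen)
  | s :: rest, f, seen =>
    if !(seen.contains (PySem.Str.lower s)) then
      pvALoop2 rest (f ++ [pvMed s]) (PySem.Set.add seen (PySem.Str.lower s))
    else pvALoop2 rest f seen

def build_skills_to_feature_py (skills : List String) (match_ : Option (List (String × List String))) (jd_comparison : Option (List (String × List String))) : List (List (String × String)) :=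
  let matched_set := pvMatchedSet match_ jd_comparison
  let r1 := pvALoop1 matched_set skills [] PySem.Set.empty
  let r2 := pvALoop2 skills r1.1 r1.2
  let r3 := pvMissingPhase match_ r2
  PySem.List.slice r3.1 none (some 10)

-- ===== PORT B =====
-- B's single pass: first occurrence of each lowercased skill goes to `high` or `medium`
def pvBLoop (M : PySem.Set String) : List String → List (List (String × String)) → List (List (String × String)) → PySem.Set String → List (List (String × String)) × List (List (String × String)) × PySem.Set String
  | [], high, medium, seen => (high, medium, seen)
  | s :: rest, high, medium, seen =>
    if seen.contains (PySem.Str.lower s) then pvBLoop M rest high medium seen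
    else
      if M.contains (PySem.Str.lower s) then
        pvBLoop M rest (high ++ [pvHigh s]) medium (PySem.Set.add seen (PySem.Str.lower s))
      else
        pvBLoop M rest high (medium ++ [pvMed s]) (PySem.Set.add seen (PySem.Str.lower s))

def build_skills_to_feature_py_alt (skills : List String) (match_ : Option (List (String × List String))) (jd_comparison : Option (List (String × List String))) : List (List (String × String)) :=
  let matched_set := pvMatchedSet match_ jd_comparison
  let r := pvBLoop matched_set skills [] [] PySem.Set.empty
  let featured := r.1 ++ r.2.1
  let r3 := pvMissingPhase match_ (featured, r.2.2)
  PySem.List.slice r3.1 none (some 10)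

-- ===== PRECONDITION & SPEC =====
def Spec_build_skills_to_feature_py (skills : List String) (match_ : Option (List (String × List String))) (jd_comparison : Option (List (String × List String))) (out : List (List (String × String))) : Prop := out = build_skills_to_feature_py_alt skills match_ jd_comparison
instance (skills : List String) (match_ : Option (List (String × List String))) (jd_comparison : Option (List (String × List String))) (out : List (List (String × String))) : Decidable (Spec_build_skills_to_feature_py skills match_ jd_comparison out) := by unfold Spec_build_skills_to_feature_py; infer_instance

-- ===== CLAIM (what is proved, stated in full; the proofs are below) =====
def Claim_equal_build_skills_to_feature_py : Prop := ∀ (skills : List String) (match_ : Option (List (String × List String))) (jd_comparison : Option (List (String × List String))), Dom_build_skills_to_feature_py skills match_ jd_comparison → Spec_build_skills_to_feature_py skills match_ jd_comparison (build_skills_to_feature_py skills match_ jd_comparison)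



-- ===== LEMMAS AND PROOFS =====

-- dedup of a skill list relative to a set of already-seen lowercased names
def pvDdl (seen : List String) : List String → List String
  | [] => []
  | s :: r => if PySem.Str.lower s ∈ seen then pvDdl seen r else s :: pvDdl (seen ++ [PySem.Str.lower s]) r

theorem pvContains_of_mem {s : PySem.Set String} {x : String} (h : x ∈ s) :
    PySem.Set.contains s x = true := (PySem.Set.contains_iff s x).mpr h

theorem pvContains_of_not_mem {s : PySem.Set String} {x : String} (h : ¬ x ∈ s) :
    PySem.Set.contains s x = false := by
  cases hc : PySem.Set.contains s x
  · rfl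
  · exact absurd ((PySem.Set.contains_iff s x).mp hc) h

theorem pvAdd_eq {s : PySem.Set String} {x : String} (h : ¬ x ∈ s) :
    PySem.Set.add s x = s ++ [x] := by
  simp [PySem.Set.add, h]

theorem pvDdl_congr : ∀ (xs : List String) {s1 s2 : List String},
    (∀ x, x ∈ s1 ↔ x ∈ s2) → pvDdl s1 xs = pvDdl s2 xs
  | [], _, _, _ => rfl
  | s :: r, s1, s2, h => by
    by_cases hm : PySem.Str.lower s ∈ s1
    · rw [pvDdl, pvDdl, if_pos hm, if_pos ((h _).mp hm)]
      exact pvDdl_congr r h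
    · rw [pvDdl, pvDdl, if_neg hm, if_neg (fun hx => hm ((h _).mpr hx))]
      refine congrArg (s :: ·) (pvDdl_congr r ?_)
      intro x; simp only [List.mem_append, h x]

theorem pvDdl_low_not_mem : ∀ (xs : List String) (seen : List String) {t : String},
    t ∈ pvDdl seen xs → PySem.Str.lower t ∉ seen
  | [], _, _, ht => by simp [pvDdl] at ht
  | s :: r, seen, t, ht => by
    rw [pvDdl] at ht
    by_cases hm : PySem.Str.lower s ∈ seen
    · rw [if_pos hm] at ht
      exact pvDdl_low_not_mem r seen ht
    · rw [if_neg hm] at ht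
      rcases List.mem_cons.mp ht with rfl | ht
      · exact hm
      · intro hc
        exact pvDdl_low_not_mem r _ ht (by simp [hc])

-- characterization of A's first loop
theorem pvALoop1_eq (M : PySem.Set String) : ∀ (xs : List String) (f : List (List (String × String))) (seen : PySem.Set String),
    pvALoop1 M xs f seen =
      (f ++ (pvDdl seen (xs.filter fun s => M.contains (PySem.Str.lower s))).map pvHigh,
       seen ++ (pvDdl seen (xs.filter fun s => M.contains (PySem.Str.lower s))).map PySem.Str.lower)
  | [], f, seen => by simp [pvALoop1, pvDdl]
  | s :: r, f, seen => by
    rw [pvALoop1]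
    by_cases hP : M.contains (PySem.Str.lower s) = true
    · have hPm : PySem.Str.lower s ∈ M := (PySem.Set.contains_iff M _).mp hP
      by_cases hm : PySem.Str.lower s ∈ seen
      · have hc : ¬((M.contains (PySem.Str.lower s) && !(PySem.Set.contains seen (PySem.Str.lower s))) = true) := by
          simp [hm]
        rw [if_neg hc, pvALoop1_eq M r f seen]
        simp only [List.filter_cons_of_pos (p := fun s => M.contains (PySem.Str.lower s)) hP, pvDdl, if_pos hm]
      · have hc : (M.contains (PySem.Str.lower s) && !(PySem.Set.contains seen (PySem.Str.lower s))) = true := by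
          simp [hPm, hm]
        rw [if_pos hc, pvALoop1_eq M r (f ++ [pvHigh s]) (PySem.Set.add seen (PySem.Str.lower s)),
          pvAdd_eq hm]
        simp only [List.filter_cons_of_pos (p := fun s => M.contains (PySem.Str.lower s)) hP, pvDdl, if_neg hm, List.map_cons,
          List.append_assoc, List.singleton_append]
    · have hPn : PySem.Str.lower s ∉ M := fun hx => hP ((PySem.Set.contains_iff M _).mpr hx)
      have hc : ¬((M.contains (PySem.Str.lower s) && !(PySem.Set.contains seen (PySem.Str.lower s))) = true) := by
        simp [hPn]
      rw [if_neg hc, pvALoop1_eq M r f seen]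
      simp only [List.filter_cons_of_neg (p := fun s => M.contains (PySem.Str.lower s)) hP]

-- characterization of A's second loop
theorem pvALoop2_eq : ∀ (xs : List String) (f : List (List (String × String))) (seen : PySem.Set String),
    pvALoop2 xs f seen =
      (f ++ (pvDdl seen xs).map pvMed, seen ++ (pvDdl seen xs).map PySem.Str.lower)
  | [], f, seen => by simp [pvALoop2, pvDdl]
  | s :: r, f, seen => by
    rw [pvALoop2]
    by_cases hm : PySem.Str.lower s ∈ seen
    · have hc : ¬((!(PySem.Set.contains seen (PySem.Str.lower s))) = true) := by simp [hm]
      rw [if_neg hc, pvALoop2_eq r f seen]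
      simp only [pvDdl, if_pos hm]
    · have hc : (!(PySem.Set.contains seen (PySem.Str.lower s))) = true := by simp [hm]
      rw [if_pos hc, pvALoop2_eq r (f ++ [pvMed s]) (PySem.Set.add seen (PySem.Str.lower s)),
        pvAdd_eq hm]
      simp only [pvDdl, if_neg hm, List.map_cons, List.append_assoc, List.singleton_append]

-- characterization of B's single pass
theorem pvBLoop_eq (M : PySem.Set String) : ∀ (xs : List String) (h m : List (List (String × String))) (seen : PySem.Set String),
    pvBLoop M xs h m seen =
      (h ++ ((pvDdl seen xs).filter fun s => M.contains (PySem.Str.lower s)).map pvHigh,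
       m ++ ((pvDdl seen xs).filter fun s => !(M.contains (PySem.Str.lower s))).map pvMed,
       seen ++ (pvDdl seen xs).map PySem.Str.lower)
  | [], h, m, seen => by simp [pvBLoop, pvDdl]
  | s :: r, h, m, seen => by
    rw [pvBLoop]
    by_cases hm : PySem.Str.lower s ∈ seen
    · rw [if_pos (pvContains_of_mem hm), pvBLoop_eq M r h m seen]
      simp only [pvDdl, if_pos hm]
    · have hc : ¬(PySem.Set.contains seen (PySem.Str.lower s) = true) := by simp [hm]
      rw [if_neg hc]
      by_cases hP : M.contains (PySem.Str.lower s) = true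
      · rw [if_pos hP, pvBLoop_eq M r (h ++ [pvHigh s]) m (PySem.Set.add seen (PySem.Str.lower s)),
          pvAdd_eq hm]
        simp only [pvDdl, if_neg hm, List.filter_cons_of_pos (p := fun s => M.contains (PySem.Str.lower s)) hP,
          List.filter_cons_of_neg (p := fun s => !(M.contains (PySem.Str.lower s))) (a := s) (by simp [(PySem.Set.contains_iff M (PySem.Str.lower s)).mp hP]),
          List.map_cons, List.append_assoc, List.singleton_append]
      · rw [if_neg hP, pvBLoop_eq M r h (m ++ [pvMed s]) (PySem.Set.add seen (PySem.Str.lower s)),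
          pvAdd_eq hm]
        simp only [pvDdl, if_neg hm, List.filter_cons_of_neg (p := fun s => M.contains (PySem.Str.lower s)) hP,
          List.filter_cons_of_pos (p := fun s => !(M.contains (PySem.Str.lower s))) (a := s) (by simp [show PySem.Str.lower s ∉ M from fun hx => hP ((PySem.Set.contains_iff M (PySem.Str.lower s)).mpr hx)]),
          List.map_cons, List.append_assoc, List.singleton_append]

-- adding one unmatched lowercased name to `seen` does not change the matched part of the dedup
theorem pvDdl_filter_extra (M : PySem.Set String) {l : String} (hl : M.contains l = false) :
    ∀ (xs : List String) (seen : List String),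
    (pvDdl (seen ++ [l]) xs).filter (fun s => M.contains (PySem.Str.lower s)) =
      (pvDdl seen xs).filter (fun s => M.contains (PySem.Str.lower s))
  | [], seen => rfl
  | s :: r, seen => by
    by_cases hm : PySem.Str.lower s ∈ seen
    · rw [pvDdl, pvDdl, if_pos hm, if_pos (by simp [hm])]
      exact pvDdl_filter_extra M hl r seen
    · by_cases he : PySem.Str.lower s = l
      · have hlm : l ∉ M := fun hx => by rw [pvContains_of_mem hx] at hl; exact Bool.noConfusion hl
        rw [pvDdl, pvDdl, if_pos (by simp [he]), if_neg hm]
        rw [List.filter_cons_of_neg (p := fun s => M.contains (PySem.Str.lower s)) (a := s) (by simp [he, hlm]), he]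
      · rw [pvDdl, pvDdl, if_neg (by simp [hm, he]), if_neg hm]
        rw [List.filter_cons, List.filter_cons]
        have hc : pvDdl (seen ++ [l] ++ [PySem.Str.lower s]) r
            = pvDdl (seen ++ [PySem.Str.lower s] ++ [l]) r := by
          refine pvDdl_congr r ?_
          intro x; simp only [List.mem_append]; tauto
        rw [hc, pvDdl_filter_extra M hl r (seen ++ [PySem.Str.lower s])]

-- A's first loop selects exactly the matched part of the full dedup
theorem pvDdl_filter_comm (M : PySem.Set String) : ∀ (xs : List String) (seen : List String),
    pvDdl seen (xs.filter fun s => M.contains (PySem.Str.lower s)) =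
      (pvDdl seen xs).filter (fun s => M.contains (PySem.Str.lower s))
  | [], seen => rfl
  | s :: r, seen => by
    by_cases hP : M.contains (PySem.Str.lower s) = true
    · rw [List.filter_cons_of_pos (p := fun s => M.contains (PySem.Str.lower s)) hP]
      by_cases hm : PySem.Str.lower s ∈ seen
      · rw [pvDdl, pvDdl, if_pos hm, if_pos hm]
        exact pvDdl_filter_comm M r seen
      · rw [pvDdl, pvDdl, if_neg hm, if_neg hm]
        rw [List.filter_cons_of_pos (p := fun s => M.contains (PySem.Str.lower s)) hP]
        rw [pvDdl_filter_comm M r (seen ++ [PySem.Str.lower s])]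
    · rw [List.filter_cons_of_neg (p := fun s => M.contains (PySem.Str.lower s)) hP]
      by_cases hm : PySem.Str.lower s ∈ seen
      · have hdd : pvDdl seen (s :: r) = pvDdl seen r := by rw [pvDdl, if_pos hm]
        rw [hdd]
        exact pvDdl_filter_comm M r seen
      · have hdd : pvDdl seen (s :: r) = s :: pvDdl (seen ++ [PySem.Str.lower s]) r := by
          rw [pvDdl, if_neg hm]
        rw [hdd]
        rw [List.filter_cons_of_neg (p := fun s => M.contains (PySem.Str.lower s)) hP]
        have hPn : PySem.Str.lower s ∉ M := fun hx => hP ((PySem.Set.contains_iff M (PySem.Str.lower s)).mpr hx)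
        rw [pvDdl_filter_extra M (pvContains_of_not_mem hPn) r seen]
        exact pvDdl_filter_comm M r seen
  termination_by xs => xs.length
  decreasing_by all_goals simp

-- A's second loop, started from the seen-set left by the first loop, selects the unmatched part
theorem pvDdl_second (M : PySem.Set String) : ∀ (xs : List String) (seen : List String),
    pvDdl (seen ++ ((pvDdl seen xs).filter (fun s => M.contains (PySem.Str.lower s))).map PySem.Str.lower) xs =
      (pvDdl seen xs).filter (fun s => !(M.contains (PySem.Str.lower s)))
  | [], seen => rfl
  | s :: r, seen => by
    by_cases hm : PySem.Str.lower s ∈ seen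
    · have hdd : pvDdl seen (s :: r) = pvDdl seen r := by rw [pvDdl, if_pos hm]
      rw [hdd]
      have hdd2 : ∀ X : List String, pvDdl (seen ++ X) (s :: r) = pvDdl (seen ++ X) r := fun X => by
        rw [pvDdl, if_pos (by simp [hm])]
      rw [hdd2]
      exact pvDdl_second M r seen
    · have hdd : pvDdl seen (s :: r) = s :: pvDdl (seen ++ [PySem.Str.lower s]) r := by
        rw [pvDdl, if_neg hm]
      rw [hdd]
      by_cases hP : M.contains (PySem.Str.lower s) = true
      · rw [List.filter_cons_of_pos (p := fun s => M.contains (PySem.Str.lower s)) hP, List.filter_cons_of_neg (p := fun s => !(M.contains (PySem.Str.lower s))) (a := s) (by simp [(PySem.Set.contains_iff M (PySem.Str.lower s)).mp hP])]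
        have hddX : ∀ X : List String, PySem.Str.lower s ∈ X → pvDdl X (s :: r) = pvDdl X r :=
          fun X hX => by rw [pvDdl, if_pos hX]
        rw [List.map_cons,
          hddX (seen ++ (PySem.Str.lower s :: ((pvDdl (seen ++ [PySem.Str.lower s]) r).filter (fun s => M.contains (PySem.Str.lower s))).map PySem.Str.lower)) (by simp)]
        have hc : pvDdl (seen ++ (PySem.Str.lower s :: ((pvDdl (seen ++ [PySem.Str.lower s]) r).filter (fun t => M.contains (PySem.Str.lower t))).map PySem.Str.lower)) r
            = pvDdl ((seen ++ [PySem.Str.lower s]) ++ ((pvDdl (seen ++ [PySem.Str.lower s]) r).filter (fun t => M.contains (PySem.Str.lower t))).map PySem.Str.lower) r := by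
          refine pvDdl_congr r ?_
          intro x; simp only [List.mem_append, List.mem_cons]; tauto
        rw [hc]
        exact pvDdl_second M r (seen ++ [PySem.Str.lower s])
      · rw [List.filter_cons_of_neg (p := fun s => M.contains (PySem.Str.lower s)) hP, List.filter_cons_of_pos (p := fun s => !(M.contains (PySem.Str.lower s))) (a := s) (by simp [show PySem.Str.lower s ∉ M from fun hx => hP ((PySem.Set.contains_iff M (PySem.Str.lower s)).mpr hx)])]
        have hnot : PySem.Str.lower s ∉ seen ++ ((pvDdl (seen ++ [PySem.Str.lower s]) r).filter (fun t => M.contains (PySem.Str.lower t))).map PySem.Str.lower := by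
          intro hx
          rcases List.mem_append.mp hx with hx | hx
          · exact hm hx
          · rcases List.mem_map.mp hx with ⟨t, ht, hlt⟩
            have := pvDdl_low_not_mem r _ (List.mem_of_mem_filter ht)
            exact this (by simp [hlt])
        have hddX2 : ∀ X : List String, PySem.Str.lower s ∉ X → pvDdl X (s :: r) = s :: pvDdl (X ++ [PySem.Str.lower s]) r :=
          fun X hX => by rw [pvDdl, if_neg hX]
        rw [hddX2 (seen ++ ((pvDdl (seen ++ [PySem.Str.lower s]) r).filter (fun s => M.contains (PySem.Str.lower s))).map PySem.Str.lower) hnot]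
        refine congrArg (s :: ·) ?_
        have hc : pvDdl (seen ++ ((pvDdl (seen ++ [PySem.Str.lower s]) r).filter (fun t => M.contains (PySem.Str.lower t))).map PySem.Str.lower ++ [PySem.Str.lower s]) r
            = pvDdl ((seen ++ [PySem.Str.lower s]) ++ ((pvDdl (seen ++ [PySem.Str.lower s]) r).filter (fun t => M.contains (PySem.Str.lower t))).map PySem.Str.lower) r := by
          refine pvDdl_congr r ?_
          intro x; simp only [List.mem_append, List.mem_cons]; tauto
        rw [hc]
        exact pvDdl_second M r (seen ++ [PySem.Str.lower s])

-- the missing-keyword loop depends on `seen` only through membership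
theorem pvMissingLoop_congr : ∀ (xs : List String) (f : List (List (String × String))) {s1 s2 : PySem.Set String},
    (∀ x, x ∈ s1 ↔ x ∈ s2) → (pvMissingLoop xs (f, s1)).1 = (pvMissingLoop xs (f, s2)).1
  | [], _, _, _, _ => rfl
  | kw :: r, f, s1, s2, h => by
    by_cases hm : PySem.Str.lower kw ∈ s1
    · rw [pvMissingLoop, pvMissingLoop, if_pos (pvContains_of_mem hm),
        if_pos (pvContains_of_mem ((h _).mp hm))]
      exact pvMissingLoop_congr r f h
    · have hm2 : PySem.Str.lower kw ∉ s2 := fun hx => hm ((h _).mpr hx)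
      rw [pvMissingLoop, pvMissingLoop, if_neg (by simp [hm]), if_neg (by simp [hm2])]
      refine pvMissingLoop_congr r (f ++ [pvAdd kw]) ?_
      intro x
      simp only [PySem.Set.mem_add, h x]

theorem pvMissingPhase_congr (match_ : Option (List (String × List String)))
    (f : List (List (String × String))) {s1 s2 : PySem.Set String}
    (h : ∀ x, x ∈ s1 ↔ x ∈ s2) :
    (pvMissingPhase match_ (f, s1)).1 = (pvMissingPhase match_ (f, s2)).1 := by
  unfold pvMissingPhase
  cases match_ with
  | none => rfl
  | some d =>
    dsimp only
    by_cases hd : d ≠ []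
    · rw [if_pos hd, if_pos hd]
      cases pvLookup d "missing" with
      | none => rfl
      | some v =>
        dsimp only
        by_cases hv : v ≠ []
        · rw [if_pos hv, if_pos hv]
          exact pvMissingLoop_congr _ f h
        · rw [if_neg hv, if_neg hv]
    · rw [if_neg hd, if_neg hd]

-- ===== VERDICT (by name: the statement is the Claim_ definition above) =====
theorem build_skills_to_feature_py_spec : Claim_equal_build_skills_to_feature_py := by
  intro skills match_ jd_comparison _
  unfold Spec_build_skills_to_feature_py
  unfold build_skills_to_feature_py build_skills_to_feature_py_alt
  simp only [pvALoop1_eq, pvBLoop_eq]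
  rw [pvDdl_filter_comm]
  rw [pvALoop2_eq, pvDdl_second]
  refine congrArg (fun l => PySem.List.slice l none (some 10)) ?_
  refine Eq.trans (congrArg (fun f => (pvMissingPhase match_ (f, _)).1) ?_)
    (pvMissingPhase_congr match_ _ ?_)
  · simp
  · intro x
    set M := pvMatchedSet match_ jd_comparison
    set D := pvDdl PySem.Set.empty skills
    simp only [PySem.Set.empty, List.nil_append, List.mem_append, List.mem_map, List.mem_filter]
    constructor
    · rintro (⟨t, ⟨ht, _⟩, rfl⟩ | ⟨t, ⟨ht, _⟩, rfl⟩) <;> exact ⟨t, ht, rfl⟩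
    · rintro ⟨t, ht, rfl⟩
      by_cases hP : M.contains (PySem.Str.lower t) = true
      · exact Or.inl ⟨t, ⟨ht, hP⟩, rfl⟩
      · have hPn : PySem.Str.lower t ∉ M := fun hx => hP ((PySem.Set.contains_iff M (PySem.Str.lower t)).mpr hx)
        exact Or.inr ⟨t, ⟨ht, by simp [hPn]⟩, rfl⟩
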